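-- pv_equiv track=rewrite | github.com/coherosphere/architecture | scripts/fix_mermaid_diagrams.py | clean_prelude
-- ===== SOURCE A (Python) =====
-- VALID_STARTERS = (
--     "flowchart", "graph", "sequenceDiagram", "classDiagram",
--     "stateDiagram-v2", "stateDiagram", "erDiagram", "gantt",
--     "journey", "pie", "quadrantChart", "mindmap", "timeline", "gitGraph"
-- )
--
-- def is_mermaid_directive(line: str) -> bool:
--     s = line.strip()
--     if not s or s.startswith('%%'):
--         return False
--     # allow init block as prelude
--     if s.startswith('%%{') and s.endswith('}%%'):
--         return False
--     return any(s.startswith(k) for k in VALID_STARTERS)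
--
-- def clean_prelude(lines: list[str]) -> list[str]:
--     """
--     Drop any non-mermaid headers (e.g., 'title:' or 'config:' YAML-ish lines)
--     that appear *before* the first real mermaid directive. Keep comments and init blocks.
--     """
--     out = []
--     seen_directive = False
--     i = 0
--     while i < len(lines):
--         line = lines[i]
--         s = line.strip()
--
--         if not seen_directive:
--             if s.startswith('%%'):            # keep comments
--                 out.append(line)
--             elif s.startswith('%%{') and s.endswith('}%%'):  # keep init
--                 out.append(line)
--             elif is_mermaid_directive(s):
--                 seen_directive = True
--                 out.append(line)
--             else:
--                 # drop stray YAML-like headers (title:, config:, etc.) and blank prelude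
--                 # keep only if obviously mermaid (rare corner-case)
--                 pass
--         else:
--             out.append(line)
--         i += 1
--     return out
-- ===== SOURCE B (Python) =====
-- VALID_STARTERS = (
--     "flowchart", "graph", "sequenceDiagram", "classDiagram",
--     "stateDiagram-v2", "stateDiagram", "erDiagram", "gantt",
--     "journey", "pie", "quadrantChart", "mindmap", "timeline", "gitGraph"
-- )
--
-- def is_mermaid_directive(line: str) -> bool:
--     s = line.strip()
--     if not s or s.startswith('%%'):
--         return False
--     if s.startswith('%%{') and s.endswith('}%%'):
--         return False
--     return any(s.startswith(k) for k in VALID_STARTERS)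
--
-- def clean_prelude(lines: list[str]) -> list[str]:
--     idx = next((i for i, l in enumerate(lines) if is_mermaid_directive(l)), len(lines))
--     return [l for l in lines[:idx] if l.strip().startswith('%%')] + lines[idx:]
-- ===== Notes on version B (the rewrite author's own statement) =====
-- stated objective: simpler
-- what changed: Replaces A's stateful seen_directive while-loop with a find-split decomposition: find the index of the first mermaid directive, then filter the prelude slice for '%%'-prefixed lines and append the remainder verbatim.
import Mathlib
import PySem

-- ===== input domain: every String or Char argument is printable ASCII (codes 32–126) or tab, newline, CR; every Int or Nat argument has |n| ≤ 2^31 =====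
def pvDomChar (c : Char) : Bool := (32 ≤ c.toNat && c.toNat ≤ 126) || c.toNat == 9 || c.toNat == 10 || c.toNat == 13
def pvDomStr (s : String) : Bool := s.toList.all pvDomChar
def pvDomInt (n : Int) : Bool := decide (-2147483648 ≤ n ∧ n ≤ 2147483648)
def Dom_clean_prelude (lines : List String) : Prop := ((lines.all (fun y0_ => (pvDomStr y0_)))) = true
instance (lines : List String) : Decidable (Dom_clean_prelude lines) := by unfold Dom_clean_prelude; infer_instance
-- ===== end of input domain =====

-- B replaces A's stateful seen_directive loop by a find-split decomposition: locate the first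
-- directive line, filter the prelude slice for '%%'-prefixed lines, keep the rest verbatim (objective: simpler).

-- ===== PORT A =====
def VALID_STARTERS : List String :=
  ["flowchart", "graph", "sequenceDiagram", "classDiagram",
   "stateDiagram-v2", "stateDiagram", "erDiagram", "gantt",
   "journey", "pie", "quadrantChart", "mindmap", "timeline", "gitGraph"]

def is_mermaid_directive (line : String) : Bool :=
  let s := PySem.Str.strip line
  if PySem.Str.len s = 0 || PySem.Str.startswith s "%%" then false
  else if PySem.Str.startswith s "%%{" && PySem.Str.endswith s "}%%" then false
  else VALID_STARTERS.any (fun k => PySem.Str.startswith s k)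

def clean_prelude (lines : List String) : List String :=
  (lines.foldl (fun (st : List String × Bool) line =>
      let s := PySem.Str.strip line
      if st.2 = false then
        if PySem.Str.startswith s "%%" then (st.1 ++ [line], st.2)        -- keep comments
        else if PySem.Str.startswith s "%%{" && PySem.Str.endswith s "}%%" then (st.1 ++ [line], st.2)  -- keep init
        else if is_mermaid_directive s then (st.1 ++ [line], true)
        else (st.1, st.2)                                                  -- drop stray prelude line
      else (st.1 ++ [line], st.2))
    ([], false)).1

-- ===== PORT B =====
def clean_prelude_alt (lines : List String) : List String :=
  let idx := (lines.findIdx? (fun l => is_mermaid_directive l)).getD lines.length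
  (lines.take idx).filter (fun l => PySem.Str.startswith (PySem.Str.strip l) "%%")
    ++ lines.drop idx

-- ===== PRECONDITION & SPEC =====
def Spec_clean_prelude (lines : List String) (out : List String) : Prop := out = clean_prelude_alt lines
instance (lines : List String) (out : List String) : Decidable (Spec_clean_prelude lines out) := by unfold Spec_clean_prelude; infer_instance

-- ===== CLAIM (what is proved, stated in full; the proofs are below) =====
def Claim_equal_clean_prelude : Prop := ∀ (lines : List String), Dom_clean_prelude lines → Spec_clean_prelude lines (clean_prelude lines)

-- ===== LEMMAS AND PROOFS =====

-- a prefix of a whitespace-free-at-the-front list is itself whitespace-free at the front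
theorem dropWhile_of_prefix {p : Char → Bool} {l l' : List Char}
    (hpre : l' <+: l) (h : List.dropWhile p l = l) : List.dropWhile p l' = l' := by
  cases l' with
  | nil => simp
  | cons a t =>
    obtain ⟨r, hr⟩ := hpre
    subst hr
    simp only [List.cons_append, List.dropWhile_cons] at h ⊢
    split at h
    · have hlen := congrArg List.length h
      have := List.length_dropWhile_le p (t ++ r)
      simp at hlen this; omega
    · simp_all

theorem chars_strip_strip (cs : List Char) :
    PySem.Chars.strip (PySem.Chars.strip cs) = PySem.Chars.strip cs := by
  simp only [PySem.Chars.strip, PySem.Chars.lstrip, PySem.Chars.rstrip]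
  have h1 : List.dropWhile PySem.Chars.isspace (List.dropWhile PySem.Chars.isspace cs)
      = List.dropWhile PySem.Chars.isspace cs := List.dropWhile_idempotent _ _
  set x := List.dropWhile PySem.Chars.isspace cs with hx
  have hpre : (List.dropWhile PySem.Chars.isspace x.reverse).reverse <+: x := by
    have := List.dropWhile_suffix (l := x.reverse) (p := PySem.Chars.isspace)
    have h2 := List.reverse_prefix.mpr (by simpa using this)
    simpa using h2
  rw [dropWhile_of_prefix hpre h1, List.reverse_reverse, List.dropWhile_idempotent]

theorem str_strip_strip (s : String) :
    PySem.Str.strip (PySem.Str.strip s) = PySem.Str.strip s := by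
  apply String.toList_inj.mp
  simp only [PySem.Str.toList_strip, chars_strip_strip]

theorem directive_strip (l : String) :
    is_mermaid_directive (PySem.Str.strip l) = is_mermaid_directive l := by
  simp only [is_mermaid_directive, str_strip_strip]

-- '%%' is a prefix of '%%{', so a line failing the '%%' test also fails the init test
theorem not_startswith_init {cs : List Char}
    (h : PySem.Chars.startswith cs ['%', '%'] = false) :
    PySem.Chars.startswith cs ['%', '%', '{'] = false := by
  by_contra hc
  rw [Bool.not_eq_false, PySem.Chars.startswith_iff] at hc
  rw [← Bool.not_eq_true, PySem.Chars.startswith_iff] at h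
  exact h (List.IsPrefix.trans (by decide) hc)

-- recursive characterization of B
theorem alt_nil : clean_prelude_alt [] = [] := rfl

theorem alt_cons (l : String) (ls : List String) :
    clean_prelude_alt (l :: ls) =
      if is_mermaid_directive l then l :: ls
      else if PySem.Str.startswith (PySem.Str.strip l) "%%" then l :: clean_prelude_alt ls
      else clean_prelude_alt ls := by
  simp only [clean_prelude_alt, List.findIdx?_cons]
  by_cases hd : is_mermaid_directive l
  · simp [hd]
  · simp only [hd, if_false, Bool.false_eq_true]
    cases hf : List.findIdx? (fun l => is_mermaid_directive l) ls with
    | none =>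
      simp only [Option.map_none, Option.getD_none, List.length_cons]
      by_cases hp : PySem.Chars.startswith (PySem.Chars.strip l.toList) ['%', '%'] = true
      · simp [hp]
      · simp [hp]
    | some j =>
      simp only [Option.map_some, Option.getD_some, List.take_succ_cons, List.drop_succ_cons]
      by_cases hp : PySem.Chars.startswith (PySem.Chars.strip l.toList) ['%', '%'] = true
      · simp [hp]
      · simp [hp]

-- A's loop body, named for the loop lemmas
def aStep (st : List String × Bool) (line : String) : List String × Bool :=
  let s := PySem.Str.strip line
  if st.2 = false then
    if PySem.Str.startswith s "%%" then (st.1 ++ [line], st.2)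
    else if PySem.Str.startswith s "%%{" && PySem.Str.endswith s "}%%" then (st.1 ++ [line], st.2)
    else if is_mermaid_directive s then (st.1 ++ [line], true)
    else (st.1, st.2)
  else (st.1 ++ [line], st.2)

theorem clean_prelude_eq_aStep (lines : List String) :
    clean_prelude lines = (lines.foldl aStep ([], false)).1 := rfl

theorem loop_true (ls : List String) (acc : List String) :
    ls.foldl aStep (acc, true) = (acc ++ ls, true) := by
  induction ls generalizing acc with
  | nil => simp
  | cons l t ih => simp [List.foldl_cons, aStep, ih]

theorem loop_false (ls : List String) (acc : List String) :
    (ls.foldl aStep (acc, false)).1 = acc ++ clean_prelude_alt ls := by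
  induction ls generalizing acc with
  | nil => simp [alt_nil]
  | cons l t ih =>
    rw [List.foldl_cons, alt_cons]
    by_cases hp : PySem.Chars.startswith (PySem.Chars.strip l.toList) ['%', '%'] = true
    · have hd : is_mermaid_directive l = false := by
        simp [is_mermaid_directive, hp]
      have hstep : aStep (acc, false) l = (acc ++ [l], false) := by
        simp [aStep, hp]
      rw [hstep, ih]
      simp [hd, hp]
    · have hp' : PySem.Chars.startswith (PySem.Chars.strip l.toList) ['%', '%'] = false :=
        Bool.eq_false_iff.mpr hp
      have hinit : PySem.Chars.startswith (PySem.Chars.strip l.toList) ['%', '%', '{'] = false :=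
        not_startswith_init hp'
      by_cases hd : is_mermaid_directive l
      · have hstep : aStep (acc, false) l = (acc ++ [l], true) := by
          simp [aStep, hp', hinit, directive_strip, hd]
        rw [hstep, loop_true]
        simp [hd]
      · have hd' : is_mermaid_directive l = false := Bool.eq_false_iff.mpr hd
        have hstep : aStep (acc, false) l = (acc, false) := by
          simp [aStep, hp', hinit, directive_strip, hd']
        rw [hstep, ih]
        simp [hd', hp']

-- ===== VERDICT (by name: the statement is the Claim_ definition above) =====
theorem clean_prelude_spec : Claim_equal_clean_prelude := by
  intro lines _
  show clean_prelude lines = clean_prelude_alt lines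
  rw [clean_prelude_eq_aStep, loop_false]
  simp
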